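-- pv_equiv track=rewrite | github.com/IroiseStudio/sentiment-analysis-techniques | tabs/nlp/predict_tab.py | _guess_label
-- ===== SOURCE A (Python) =====
-- from typing import Callable, Optional, Dict, Any, List, Tuple
--
-- def _guess_label(labels: List[str], target: str) -> Optional[str]:
--     t = target.lower()
--     for lab in labels:
--         if lab.lower() == t:
--             return lab
--     for lab in labels:
--         if t in lab.lower() or lab.lower() in t:
--             return lab
--     return None
-- ===== SOURCE B (Python) =====
-- from typing import List, Optional
--
-- def _guess_label(labels: List[str], target: str) -> Optional[str]:
--     t = target.lower()
--     first_sub = None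
--     for lab in labels:
--         low = lab.lower()
--         if low == t:
--             return lab
--         if first_sub is None and (t in low or low in t):
--             first_sub = lab
--     return first_sub
-- ===== Notes on version B (the rewrite author's own statement) =====
-- stated objective: alternative
-- what changed: Replaces A's two sequential passes over labels with a single pass that returns immediately on an exact lowercase match and remembers the first substring match in a variable, returned only after the loop.
import Mathlib
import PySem

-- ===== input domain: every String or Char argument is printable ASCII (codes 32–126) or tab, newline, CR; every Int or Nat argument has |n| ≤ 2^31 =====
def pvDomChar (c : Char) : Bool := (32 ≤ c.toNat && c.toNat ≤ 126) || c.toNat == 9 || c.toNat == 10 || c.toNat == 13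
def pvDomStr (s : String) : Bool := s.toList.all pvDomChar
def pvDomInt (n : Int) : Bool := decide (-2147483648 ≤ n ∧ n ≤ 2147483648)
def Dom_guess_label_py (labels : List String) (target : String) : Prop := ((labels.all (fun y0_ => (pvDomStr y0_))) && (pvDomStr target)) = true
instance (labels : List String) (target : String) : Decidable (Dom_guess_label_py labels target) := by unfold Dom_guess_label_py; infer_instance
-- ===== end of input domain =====

-- B collapses A's two passes into one pass that returns on an exact lowercase match and remembers the first substring match.


-- ===== PORT A =====
-- first loop of A: exact lowercase match
def guessA_exact (labels : List String) (t : String) : Option String :=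
  match labels with
  | [] => none
  | lab :: rest => if PySem.Str.lower lab = t then some lab else guessA_exact rest t

-- second loop of A: substring match (lab.lower() computed twice, as written)
def guessA_sub (labels : List String) (t : String) : Option String :=
  match labels with
  | [] => none
  | lab :: rest =>
      if PySem.Str.isIn t (PySem.Str.lower lab) || PySem.Str.isIn (PySem.Str.lower lab) t
      then some lab else guessA_sub rest t

def guess_label_py (labels : List String) (target : String) : Option String :=
  let t := PySem.Str.lower target
  match guessA_exact labels t with
  | some lab => some lab
  | none => guessA_sub labels t

-- ===== PORT B =====
-- B's single loop: return on exact match, remember the first substring candidate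
def guessB (labels : List String) (t : String) (firstSub : Option String) : Option String :=
  match labels with
  | [] => firstSub
  | lab :: rest =>
      let low := PySem.Str.lower lab
      if low = t then some lab
      else
        let firstSub' :=
          if firstSub.isNone && (PySem.Str.isIn t low || PySem.Str.isIn low t)
          then some lab else firstSub
        guessB rest t firstSub'

def guess_label_py_alt (labels : List String) (target : String) : Option String :=
  guessB labels (PySem.Str.lower target) none

-- ===== PRECONDITION & SPEC =====
def Spec_guess_label_py (labels : List String) (target : String) (out : Option String) : Prop := out = guess_label_py_alt labels target
instance (labels : List String) (target : String) (out : Option String) : Decidable (Spec_guess_label_py labels target out) := by unfold Spec_guess_label_py; infer_instance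

-- ===== CLAIM (what is proved, stated in full; the proofs are below) =====
def Claim_equal_guess_label_py : Prop := ∀ (labels : List String) (target : String), Dom_guess_label_py labels target → Spec_guess_label_py labels target (guess_label_py labels target)

-- ===== LEMMAS AND PROOFS =====
-- loop invariant: B's single pass equals "exact match, else saved candidate, else first substring match"
theorem guessB_eq (labels : List String) (t : String) (cand : Option String) :
    guessB labels t cand =
      match guessA_exact labels t with
      | some lab => some lab
      | none =>
          match cand with
          | some c => some c
          | none => guessA_sub labels t := by
  induction labels generalizing cand with
  | nil => cases cand <;> simp [guessB, guessA_exact, guessA_sub]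
  | cons lab rest ih =>
      simp only [guessB, guessA_exact, guessA_sub]
      by_cases h : PySem.Str.lower lab = t
      · simp [h]
      · simp only [h, if_false, ih]
        cases cand
        · cases guessA_exact rest t <;> split_ifs <;> simp_all
        · simp

-- ===== VERDICT (by name: the statement is the Claim_ definition above) =====
theorem guess_label_py_spec : Claim_equal_guess_label_py := by
  intro labels target _
  unfold Spec_guess_label_py guess_label_py guess_label_py_alt
  rw [guessB_eq]
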